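-- pv_equiv track=rewrite | github.com/blockdancez/phantom | AIIdea/backend/src/logging_setup.py | _format_kv
-- ===== SOURCE A (Python) =====
-- def _format_kv(value) -> str:
--     """Render a single value, quoting when it contains whitespace or quotes."""
--     s = str(value)
--     if not s:
--         return '""'
--     if any(c in s for c in (" ", "\t", '"', "=")):
--         s = s.replace("\\", "\\\\").replace('"', '\\"')
--         return f'"{s}"'
--     return s
-- ===== SOURCE B (Python) =====
-- def _format_kv(value) -> str:
--     """Render a single value, quoting when it contains whitespace or quotes."""
--     s = str(value)
--     if not s:
--         return '""'
--     buf = []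
--     needs_quote = False
--     for c in s:
--         if c == ' ' or c == '\t' or c == '"' or c == '=':
--             needs_quote = True
--         if c == '\\':
--             buf.append('\\\\')
--         elif c == '"':
--             buf.append('\\"')
--         else:
--             buf.append(c)
--     if needs_quote:
--         return '"' + ''.join(buf) + '"'
--     return s
-- ===== Notes on version B (the rewrite author's own statement) =====
-- stated objective: alternative
-- what changed: Replaces A's separate any()-membership scan plus two chained .replace() passes with one combined single-pass loop that sets a needs-quote flag and builds the escaped buffer at once.
import Mathlib
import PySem

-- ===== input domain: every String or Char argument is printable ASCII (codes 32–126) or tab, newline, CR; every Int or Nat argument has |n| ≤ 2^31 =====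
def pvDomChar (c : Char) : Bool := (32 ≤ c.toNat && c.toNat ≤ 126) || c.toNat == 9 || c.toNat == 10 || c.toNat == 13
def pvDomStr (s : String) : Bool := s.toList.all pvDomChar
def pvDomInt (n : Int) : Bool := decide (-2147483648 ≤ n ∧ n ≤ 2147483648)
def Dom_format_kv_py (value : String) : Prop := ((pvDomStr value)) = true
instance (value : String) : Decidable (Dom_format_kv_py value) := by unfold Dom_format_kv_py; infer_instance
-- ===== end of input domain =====

-- B replaces A's any()-scan plus two chained .replace() passes with one single-pass
-- loop that sets a needs-quote flag and builds the escaped buffer at once (alternative).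

-- ===== PORT A =====
def format_kv_py (value : String) : String :=
  let s := value
  if s = "" then "\"\""
  else if [" ", "\t", "\"", "="].any (fun c => PySem.Str.isIn c s) then
    let s2 := PySem.Str.replace (PySem.Str.replace s "\\" "\\\\") "\"" "\\\""
    -- f'"{s}"'
    String.ofList ('"' :: s2.toList ++ ['"'])
  else s

-- ===== PORT B =====
def format_kv_py_alt (value : String) : String :=
  let s := value
  if s = "" then "\"\""
  else
    let r := s.toList.foldl (fun (acc : List Char × Bool) c =>
        (acc.1 ++ (if c = '\\' then ['\\', '\\'] else if c = '"' then ['\\', '"'] else [c]),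
         if c = ' ' ∨ c = '\t' ∨ c = '"' ∨ c = '=' then true else acc.2)) ([], false)
    if r.2 then String.ofList ('"' :: r.1 ++ ['"']) else s

-- ===== PRECONDITION & SPEC =====
def Spec_format_kv_py (value : String) (out : String) : Prop := out = format_kv_py_alt value
instance (value : String) (out : String) : Decidable (Spec_format_kv_py value out) := by unfold Spec_format_kv_py; infer_instance

-- ===== CLAIM (what is proved, stated in full; the proofs are below) =====
def Claim_equal_format_kv_py : Prop := ∀ (value : String), Dom_format_kv_py value → Spec_format_kv_py value (format_kv_py value)

-- ===== LEMMAS AND PROOFS =====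

-- escaping a single character, as performed by both renditions
def pvEsc (c : Char) : List Char :=
  if c = '\\' then ['\\', '\\'] else if c = '"' then ['\\', '"'] else [c]

def pvTrig (c : Char) : Bool := c = ' ' ∨ c = '\t' ∨ c = '"' ∨ c = '='

-- single-character replace is a flatMap
theorem pv_replace_go_single (c0 : Char) (new : List Char) :
    ∀ (fuel : Nat) (s acc : List Char), s.length ≤ fuel →
      PySem.Chars.replace.go [c0] new fuel s acc
        = acc.reverse ++ s.flatMap (fun c => if c = c0 then new else [c]) := by
  intro fuel
  induction fuel with
  | zero =>
    intro s acc h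
    have : s = [] := List.eq_nil_of_length_eq_zero (Nat.le_zero.mp h)
    subst this; simp [PySem.Chars.replace.go]
  | succ n ih =>
    intro s acc h
    cases s with
    | nil => simp [PySem.Chars.replace.go]
    | cons c t =>
      simp only [PySem.Chars.replace.go]
      by_cases hc : c = c0
      · subst hc
        have hp : List.isPrefixOf [c] (c :: t) = true := by
          simp [List.isPrefixOf]
        simp only [hp, if_pos]
        have hd : List.drop [c].length (c :: t) = t := rfl
        rw [hd, ih t (new.reverse ++ acc) (by simpa using Nat.le_of_succ_le_succ h)]
        simp
      · have hp : List.isPrefixOf [c0] (c :: t) = false := by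
          simp [List.isPrefixOf]; intro h'; exact absurd h'.symm hc
        rw [if_neg (by simp [hp])]
        rw [ih t (c :: acc) (by simpa using Nat.le_of_succ_le_succ h)]
        simp [hc]

theorem pv_replace_single (c0 : Char) (new s : List Char) :
    PySem.Chars.replace s [c0] new = s.flatMap (fun c => if c = c0 then new else [c]) := by
  rw [PySem.Chars.replace]
  rw [if_neg (by simp)]
  simpa using pv_replace_go_single c0 new s.length s [] le_rfl

-- the two chained replaces together act as pvEsc
theorem pv_double_replace (s : List Char) :
    PySem.Chars.replace (PySem.Chars.replace s ['\\'] ['\\', '\\']) ['"'] ['\\', '"']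
      = s.flatMap pvEsc := by
  rw [pv_replace_single, pv_replace_single]
  induction s with
  | nil => simp
  | cons c t ih =>
    simp only [List.flatMap_cons, List.flatMap_append, ih]
    congr 1
    by_cases h1 : c = '\\'
    · subst h1; simp [pvEsc]
    · by_cases h2 : c = '"'
      · subst h2; simp [pvEsc]
      · simp [pvEsc, h1, h2]

theorem pv_foldl_flag (l : List Char) (b : Bool) :
    l.foldl (fun b c => if c = ' ' ∨ c = '\t' ∨ c = '"' ∨ c = '=' then true else b) b
      = (b || l.any pvTrig) := by
  induction l generalizing b with
  | nil => simp
  | cons c t ih =>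
    simp only [List.foldl_cons, List.any_cons, ih]
    by_cases h : c = ' ' ∨ c = '\t' ∨ c = '"' ∨ c = '='
    · simp [h, pvTrig]
    · simp [h, pvTrig]

theorem pv_isIn_single (a : Char) (s : String) :
    PySem.Str.isIn (String.ofList [a]) s = s.toList.any (fun c => c = a) := by
  rcases h : s.toList.any (fun c => c = a) with _ | _
  · rw [Bool.eq_false_iff]
    intro hin
    rw [PySem.Str.isIn_iff_infix, String.toList_ofList] at hin
    have ha : a ∈ s.toList := hin.mem (by simp)
    simp only [List.any_eq_false, decide_eq_true_eq] at h
    exact h a ha rfl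
  · rw [PySem.Str.isIn_iff_infix, String.toList_ofList]
    simp only [List.any_eq_true, decide_eq_true_eq] at h
    obtain ⟨c, hc, rfl⟩ := h
    obtain ⟨l1, l2, hl⟩ := List.append_of_mem hc
    exact ⟨l1, l2, by rw [hl]; simp⟩

theorem pv_any_or (l : List Char) (p q : Char → Bool) :
    l.any (fun c => p c || q c) = (l.any p || l.any q) := by
  induction l with
  | nil => rfl
  | cons c t ih =>
    cases hp : p c <;> cases hq : q c <;> simp [List.any_cons, hp, hq, ih]

theorem pv_cond_eq (s : String) :
    [" ", "\t", "\"", "="].any (fun c => PySem.Str.isIn c s) = s.toList.any pvTrig := by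
  simp only [List.any_cons, List.any_nil, Bool.or_false]
  rw [show (" " : String) = String.ofList [' '] from rfl,
      show ("\t" : String) = String.ofList ['\t'] from rfl,
      show ("\"" : String) = String.ofList ['"'] from rfl,
      show ("=" : String) = String.ofList ['='] from rfl,
      pv_isIn_single, pv_isIn_single, pv_isIn_single, pv_isIn_single]
  have : s.toList.any pvTrig
      = s.toList.any (fun c => (decide (c = ' ')) ||
          ((decide (c = '\t')) || ((decide (c = '"')) || (decide (c = '='))))) := by
    congr 1; funext c; simp [pvTrig]
  rw [this, pv_any_or, pv_any_or, pv_any_or]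

-- ===== VERDICT (by name: the statement is the Claim_ definition above) =====
theorem format_kv_py_spec : Claim_equal_format_kv_py := by
  intro value _
  unfold Spec_format_kv_py format_kv_py format_kv_py_alt
  by_cases he : value = ""
  · simp [he]
  · simp only [if_neg he]
    rw [PySem.List.foldl_prod_mk
      (fun buf c => buf ++ (if c = '\\' then ['\\', '\\'] else if c = '"' then ['\\', '"'] else [c]))
      (fun b c => if c = ' ' ∨ c = '\t' ∨ c = '"' ∨ c = '=' then true else b)]
    rw [pv_foldl_flag, pv_cond_eq]
    simp only [Bool.false_or]
    rcases h : value.toList.any pvTrig with _ | _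
    · simp
    · simp only [if_true]
      refine congrArg String.ofList ?_
      have hesc : (PySem.Str.replace (PySem.Str.replace value "\\" "\\\\") "\"" "\\\"").toList
          = value.toList.flatMap pvEsc := by
        rw [PySem.Str.toList_replace, PySem.Str.toList_replace,
            show ("\\" : String).toList = ['\\'] from rfl,
            show ("\\\\" : String).toList = ['\\', '\\'] from rfl,
            show ("\"" : String).toList = ['"'] from rfl,
            show ("\\\"" : String).toList = ['\\', '"'] from rfl,
            pv_double_replace]
      rw [hesc, PySem.List.foldl_append_eq_flatMap
        (fun c => if c = '\\' then ['\\', '\\'] else if c = '"' then ['\\', '"'] else [c])]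
      simp only [List.nil_append]
      rfl
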